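-- pv_equiv track=rewrite | github.com/samarthify/Clariona-Backend | src/collectors/collect_tiktok_apify.py | determine_country_from_location
-- ===== SOURCE A (Python) =====
-- def determine_country_from_location(location: str) -> str:
--     """Determines a likely country based on location text."""
--     country = "unknown"
--     if location:
--         location_lower = location.lower()
--         if any(country in location_lower for country in ["qatar", "doha"]):
--             country = "qatar"
--         elif any(country in location_lower for country in ["nigeria", "lagos", "abuja", "kano"]):
--             country = "nigeria"
--         elif any(country in location_lower for country in ["india", "mumbai", "delhi", "bangalore"]):
--             country = "india"
--         elif any(country in location_lower for country in ["usa", "united states", "new york", "california"]):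
--             country = "us"
--         elif any(country in location_lower for country in ["uk", "united kingdom", "london", "england"]):
--             country = "uk"
--         elif any(country in location_lower for country in ["uae", "dubai", "abu dhabi"]):
--             country = "uae"
--     return country
-- ===== SOURCE B (Python) =====
-- # Flat keyword -> (priority, country) index; the answer is the matched
-- # entry of minimum priority (a min-reduction, not a first-match cascade).
-- KEYWORD_INDEX = {
--     "qatar": (0, "qatar"), "doha": (0, "qatar"),
--     "nigeria": (1, "nigeria"), "lagos": (1, "nigeria"),
--     "abuja": (1, "nigeria"), "kano": (1, "nigeria"),
--     "india": (2, "india"), "mumbai": (2, "india"),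
--     "delhi": (2, "india"), "bangalore": (2, "india"),
--     "usa": (3, "us"), "united states": (3, "us"),
--     "new york": (3, "us"), "california": (3, "us"),
--     "uk": (4, "uk"), "united kingdom": (4, "uk"),
--     "london": (4, "uk"), "england": (4, "uk"),
--     "uae": (5, "uae"), "dubai": (5, "uae"), "abu dhabi": (5, "uae"),
-- }
--
-- def determine_country_from_location(location: str) -> str:
--     """Determines a likely country based on location text."""
--     if not location:
--         return "unknown"
--     location_lower = location.lower()
--     best = (len(KEYWORD_INDEX), "unknown")
--     for keyword, entry in KEYWORD_INDEX.items():
--         if keyword in location_lower and entry[0] < best[0]: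
--             best = entry
--     return best[1]
-- ===== Notes on version B (the rewrite author's own statement) =====
-- stated objective: alternative
-- what changed: Replaced the six ordered elif substring-group checks with a flat keyword->(priority,country) map folded with a min-priority accumulator: every keyword is tested and the lowest-priority match wins, instead of a first-match cascade over groups.
import Mathlib
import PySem

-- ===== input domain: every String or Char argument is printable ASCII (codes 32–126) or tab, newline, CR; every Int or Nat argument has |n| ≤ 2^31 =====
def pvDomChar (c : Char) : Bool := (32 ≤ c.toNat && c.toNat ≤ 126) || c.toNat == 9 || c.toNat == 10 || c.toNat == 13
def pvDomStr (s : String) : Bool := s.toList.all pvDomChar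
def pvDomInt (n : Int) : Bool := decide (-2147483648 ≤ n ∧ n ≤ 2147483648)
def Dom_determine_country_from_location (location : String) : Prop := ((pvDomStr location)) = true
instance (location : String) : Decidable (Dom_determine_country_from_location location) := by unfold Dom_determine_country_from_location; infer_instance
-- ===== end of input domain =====

-- B replaces A's first-match elif cascade by a min-priority reduction over a flat keyword index (alternative decomposition).
-- ===== PORT A =====
def determine_country_from_location (location : String) : String :=
  if location ≠ "" then
    let location_lower := PySem.Str.lower location
    if ["qatar", "doha"].any (fun k => PySem.Str.isIn k location_lower) then "qatar"
    else if ["nigeria", "lagos", "abuja", "kano"].any (fun k => PySem.Str.isIn k location_lower) then "nigeria"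
    else if ["india", "mumbai", "delhi", "bangalore"].any (fun k => PySem.Str.isIn k location_lower) then "india"
    else if ["usa", "united states", "new york", "california"].any (fun k => PySem.Str.isIn k location_lower) then "us"
    else if ["uk", "united kingdom", "london", "england"].any (fun k => PySem.Str.isIn k location_lower) then "uk"
    else if ["uae", "dubai", "abu dhabi"].any (fun k => PySem.Str.isIn k location_lower) then "uae"
    else "unknown"
  else "unknown"

-- ===== PORT B =====
-- flat keyword -> (priority, country) index, in Source B's insertion order
def keywordIndex : List (String × Nat × String) :=
  [("qatar", 0, "qatar"), ("doha", 0, "qatar"),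
   ("nigeria", 1, "nigeria"), ("lagos", 1, "nigeria"),
   ("abuja", 1, "nigeria"), ("kano", 1, "nigeria"),
   ("india", 2, "india"), ("mumbai", 2, "india"),
   ("delhi", 2, "india"), ("bangalore", 2, "india"),
   ("usa", 3, "us"), ("united states", 3, "us"),
   ("new york", 3, "us"), ("california", 3, "us"),
   ("uk", 4, "uk"), ("united kingdom", 4, "uk"),
   ("london", 4, "uk"), ("england", 4, "uk"),
   ("uae", 5, "uae"), ("dubai", 5, "uae"), ("abu dhabi", 5, "uae")]

-- the for-loop with the min-priority accumulator = a foldl over the flat index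
def determine_country_from_location_alt (location : String) : String :=
  if location = "" then "unknown"
  else
    let location_lower := PySem.Str.lower location
    (keywordIndex.foldl
      (fun best e => if PySem.Str.isIn e.1 location_lower && decide (e.2.1 < best.1) then e.2 else best)
      (keywordIndex.length, "unknown")).2

-- ===== PRECONDITION & SPEC =====
def Spec_determine_country_from_location (location : String) (out : String) : Prop := out = determine_country_from_location_alt location
instance (location : String) (out : String) : Decidable (Spec_determine_country_from_location location out) := by unfold Spec_determine_country_from_location; infer_instance

-- ===== CLAIM (what is proved, stated in full; the proofs are below) =====
def Claim_equal_determine_country_from_location : Prop := ∀ (location : String), Dom_determine_country_from_location location → Spec_determine_country_from_location location (determine_country_from_location location)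

-- ===== LEMMAS AND PROOFS =====

-- proof helper: the first-match cascade over a keyword list
def firstMatch (p : String → Bool) : List (String × Nat × String) → String
  | [] => "unknown"
  | a :: l => if p a.1 then a.2.2 else firstMatch p l

-- a fold whose accumulator already has minimal priority is unchanged
theorem foldl_min_stay (p : String → Bool) :
    ∀ (l : List (String × Nat × String)) (acc : Nat × String),
    (∀ e ∈ l, ¬ e.2.1 < acc.1) →
    l.foldl (fun best e => if p e.1 && decide (e.2.1 < best.1) then e.2 else best) acc = acc := by
  intro l
  induction l with
  | nil => intro acc _; rfl
  | cons a l ih =>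
    intro acc h
    have ha := h a (by simp)
    simp only [List.foldl, ha, decide_false, Bool.and_false]
    exact ih acc (fun e he => h e (by simp [he]))

-- over a list sorted by nondecreasing priority (all below the initial priority),
-- the min-priority fold returns the FIRST matching entry
theorem foldl_min_eq_firstMatch (p : String → Bool) :
    ∀ (l : List (String × Nat × String)) (n : Nat),
    (∀ e ∈ l, e.2.1 < n) → l.Pairwise (fun x y => x.2.1 ≤ y.2.1) →
    (l.foldl (fun best e => if p e.1 && decide (e.2.1 < best.1) then e.2 else best) (n, "unknown")).2
      = firstMatch p l := by
  intro l
  induction l with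
  | nil => intro n _ _; rfl
  | cons a l ih =>
    intro n hlt hpw
    rcases hpw with _ | ⟨hpa, hpw⟩
    by_cases hp : p a.1 = true
    · have han := hlt a (by simp)
      simp only [List.foldl, firstMatch, hp, han, decide_true, Bool.and_self, if_true]
      rw [foldl_min_stay p l a.2 (fun e he => by have := hpa e he; omega)]
    · have hp' : p a.1 = false := by simpa using hp
      simp only [List.foldl, firstMatch, hp', Bool.false_and, Bool.false_eq_true, if_false]
      exact ih n (fun e he => hlt e (by simp [he])) hpw


-- firstMatch over a group of entries sharing one country, then the rest
theorem firstMatch_append (p : String → Bool) (c : String) :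
    ∀ (g rest : List (String × Nat × String)), (∀ e ∈ g, e.2.2 = c) →
    firstMatch p (g ++ rest) = if g.any (fun e => p e.1) then c else firstMatch p rest := by
  intro g
  induction g with
  | nil => intro rest _; simp
  | cons a g ih =>
    intro rest hg
    by_cases hp : p a.1 = true
    · simp [firstMatch, hp, hg a (by simp)]
    · have hp' : p a.1 = false := by simpa using hp
      simp only [List.cons_append, firstMatch, hp', Bool.false_eq_true, if_false,
        List.any_cons, Bool.false_or]
      exact ih rest (fun e he => hg e (by simp [he]))

-- ===== VERDICT (by name: the statement is the Claim_ definition above) =====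
theorem determine_country_from_location_spec : Claim_equal_determine_country_from_location := by
  intro location _
  unfold Spec_determine_country_from_location determine_country_from_location
    determine_country_from_location_alt
  by_cases h : location = ""
  · simp [h]
  · simp only [h, ne_eq, not_false_eq_true, if_true, if_false]
    rw [foldl_min_eq_firstMatch (fun k => PySem.Str.isIn k (PySem.Str.lower location)) keywordIndex
      keywordIndex.length (by decide) (by decide)]
    have hsplit : keywordIndex =
        [("qatar", 0, "qatar"), ("doha", 0, "qatar")] ++
        ([("nigeria", 1, "nigeria"), ("lagos", 1, "nigeria"),
          ("abuja", 1, "nigeria"), ("kano", 1, "nigeria")] ++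
        ([("india", 2, "india"), ("mumbai", 2, "india"),
          ("delhi", 2, "india"), ("bangalore", 2, "india")] ++
        ([("usa", 3, "us"), ("united states", 3, "us"),
          ("new york", 3, "us"), ("california", 3, "us")] ++
        ([("uk", 4, "uk"), ("united kingdom", 4, "uk"),
          ("london", 4, "uk"), ("england", 4, "uk")] ++
        ([("uae", 5, "uae"), ("dubai", 5, "uae"), ("abu dhabi", 5, "uae")] ++ []))))) := rfl
    rw [hsplit,
      firstMatch_append _ "qatar" _ _ (by decide),
      firstMatch_append _ "nigeria" _ _ (by decide),
      firstMatch_append _ "india" _ _ (by decide),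
      firstMatch_append _ "us" _ _ (by decide),
      firstMatch_append _ "uk" _ _ (by decide),
      firstMatch_append _ "uae" _ _ (by decide)]
    simp only [firstMatch, List.any_cons, List.any_nil, Bool.or_false]
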